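-- pv_equiv track=rewrite | github.com/S3dMJ/Binary-Relations | RelationsProject.py | booleanProd
-- ===== SOURCE A (Python) =====
-- def booleanProd(u, v):
--     rows = len(u)
--     cols = len(v)
--     s = []
--     for i in range(rows):
--         col = []
--         for j in range(cols):
--             col.append(0)
--
--         s.append(col)
--
--     for i in range(len(u)):
--         s[i].clear()
--         for j in range(len(v)):
--             isEqual = False
--
--             for k in range(len(u)):
--
--                 if u[i][k] == 1 and v[k][j] == 1:
--                     isEqual = True
--
--             if isEqual:
--                 s[i].append(1)
--
--             if not isEqual:
--                 s[i].append(0)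
--
--     return s
-- ===== SOURCE B (Python) =====
-- def booleanProd(u, v):
--     m = len(v)
--     if m == 0:
--         return [[] for _ in u]
--     out = []
--     for row in u:
--         acc = [0] * m
--         for k in range(len(u)):
--             if row[k] == 1:
--                 vr = v[k]
--                 for j in range(m):
--                     if vr[j] == 1:
--                         acc[j] = 1
--         out.append(acc)
--     return out
-- ===== Notes on version B (the rewrite author's own statement) =====
-- stated objective: faster
-- what changed: B builds each output row directly by OR-accumulating the rows of v selected by the 1-entries of u's row (ikj accumulation into a preallocated 0-row), instead of A's prefill-then-clear matrix and per-cell any-flag triple loop that scans all k for every cell.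
import Mathlib
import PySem

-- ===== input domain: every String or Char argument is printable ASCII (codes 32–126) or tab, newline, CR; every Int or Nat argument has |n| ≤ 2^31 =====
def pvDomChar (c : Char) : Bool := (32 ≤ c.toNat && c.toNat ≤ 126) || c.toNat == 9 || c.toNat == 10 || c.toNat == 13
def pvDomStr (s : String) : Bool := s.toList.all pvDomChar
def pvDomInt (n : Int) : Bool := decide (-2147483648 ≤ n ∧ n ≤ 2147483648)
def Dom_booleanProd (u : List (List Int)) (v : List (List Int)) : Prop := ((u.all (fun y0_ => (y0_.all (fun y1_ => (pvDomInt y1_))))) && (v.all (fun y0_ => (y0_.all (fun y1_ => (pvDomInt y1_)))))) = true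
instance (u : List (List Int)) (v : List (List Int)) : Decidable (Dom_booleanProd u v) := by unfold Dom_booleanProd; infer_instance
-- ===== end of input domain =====

-- B builds each output row directly by OR-accumulating the rows of v selected by the 1-entries
-- of the corresponding row of u (ikj accumulation), instead of A's prefill-then-clear matrix
-- and per-cell any-flag triple loop that rescans all k for every cell; measured faster.

-- ===== PORT A =====
-- literal transliteration of A; pyGetD's defaults are never read on Pre_ (where Python does not raise)
def booleanProd (u : List (List Int)) (v : List (List Int)) : List (List Int) :=
  let rows : Int := PySem.List.len u
  let cols : Int := PySem.List.len v
  let s : List (List Int) :=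
    (PySem.List.pyRange 0 rows 1).foldl (fun s _i =>
      let col : List Int :=
        (PySem.List.pyRange 0 cols 1).foldl (fun col _j => col ++ [(0 : Int)]) []
      s ++ [col]) []
  (PySem.List.pyRange 0 (PySem.List.len u) 1).foldl (fun s i =>
    -- s[i].clear() followed by appends: the new contents of s[i] are built from []
    let si : List Int :=
      (PySem.List.pyRange 0 (PySem.List.len v) 1).foldl (fun si j =>
        let isEqual :=
          (PySem.List.pyRange 0 (PySem.List.len u) 1).foldl (fun isEqual k =>
            -- 'u[i][k] == 1 and v[k][j] == 1' (short-circuit kept as a nested if)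
            if PySem.List.pyGetD (PySem.List.pyGetD u i []) k 0 = 1 then
              (if PySem.List.pyGetD (PySem.List.pyGetD v k []) j 0 = 1 then true else isEqual)
            else isEqual) false
        if isEqual then si ++ [(1 : Int)] else si ++ [(0 : Int)]) []
    PySem.List.pySetD s i si) s

-- ===== PORT B =====
def booleanProd_alt (u : List (List Int)) (v : List (List Int)) : List (List Int) :=
  if PySem.List.len v = 0 then
    u.map (fun _ => ([] : List Int))
  else
    u.foldl (fun out row =>
      let acc : List Int :=
        (PySem.List.pyRange 0 (PySem.List.len u) 1).foldl (fun acc k =>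
          if PySem.List.pyGetD row k 0 = 1 then
            let vr := PySem.List.pyGetD v k []
            (PySem.List.pyRange 0 (PySem.List.len v) 1).foldl (fun acc j =>
              if PySem.List.pyGetD vr j 0 = 1 then PySem.List.pySetD acc j 1 else acc) acc
          else acc) (List.replicate v.length (0 : Int))
      out ++ [acc]) []

-- ===== PRECONDITION & SPEC =====
-- exactly the inputs on which Python A returns (no IndexError): if v is empty no element is
-- ever read; otherwise every row of u must reach index len(u)-1, and wherever u[i][k] == 1
-- the row v[k] must exist and reach index len(v)-1
def Pre_booleanProd (u : List (List Int)) (v : List (List Int)) : Prop :=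
  v = [] ∨ ∀ row ∈ u, u.length ≤ row.length ∧
    ∀ k < u.length, row.getD k 0 = 1 → k < v.length ∧ v.length ≤ (v.getD k []).length
instance (u : List (List Int)) (v : List (List Int)) : Decidable (Pre_booleanProd u v) := by
  unfold Pre_booleanProd; infer_instance

def pvWitness_booleanProd : List (List Int) × List (List Int) :=
  ([[1, 0], [0, 1]], [[0, 1], [1, 1]])

def Spec_booleanProd (u : List (List Int)) (v : List (List Int)) (out : List (List Int)) : Prop := out = booleanProd_alt u v
instance (u : List (List Int)) (v : List (List Int)) (out : List (List Int)) : Decidable (Spec_booleanProd u v out) := by unfold Spec_booleanProd; infer_instance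

-- ===== CLAIM (what is proved, stated in full; the proofs are below) =====
def Claim_equal_booleanProd : Prop := ∀ (u : List (List Int)) (v : List (List Int)), Dom_booleanProd u v → Pre_booleanProd u v → Spec_booleanProd u v (booleanProd u v)

-- ===== LEMMAS AND PROOFS =====

-- the common mathematical cell value: 1 iff some k < n has row[k] = 1 and v[k][j] = 1
def pvCell (v : List (List Int)) (n : Nat) (row : List Int) (j : Nat) : Int :=
  if (List.range n).any
      (fun k => decide (row.getD k 0 = 1) && decide ((v.getD k []).getD j 0 = 1))
  then 1 else 0

-- A's inner flag loop is an 'any'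
theorem pv_flag_foldl (p q : Nat → Prop) [DecidablePred p] [DecidablePred q] :
    ∀ (l : List Nat) (b : Bool),
      l.foldl (fun b k => if p k then (if q k then true else b) else b) b
        = (b || l.any (fun k => decide (p k) && decide (q k))) := by
  intro l
  induction l with
  | nil => intro b; simp
  | cons x l ih =>
    intro b
    simp only [List.foldl_cons, List.any_cons, ih]
    by_cases hp : p x <;> by_cases hq : q x <;> simp [hp, hq]

-- the write-by-index loop preserves length
theorem pv_foldl_set_length {α : Type} (f : Nat → α) :
    ∀ (l : List Nat) (s : List α),
      (l.foldl (fun s i => s.set i (f i)) s).length = s.length := by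
  intro l
  induction l with
  | nil => intro s; rfl
  | cons x l ih => intro s; simp [ih]

-- characterisation of A's second phase: position j holds f j if j was written, else the old value
theorem pv_foldl_set_getElem? {α : Type} (f : Nat → α) :
    ∀ (n : Nat) (s : List α) (j : Nat),
      ((List.range n).foldl (fun s i => s.set i (f i)) s)[j]?
        = if j < n ∧ j < s.length then some (f j) else s[j]? := by
  intro n
  induction n with
  | zero => intro s j; simp
  | succ n ih =>
    intro s j
    rw [List.range_succ, List.foldl_append]
    simp only [List.foldl_cons, List.foldl_nil]
    rw [List.getElem?_set, pv_foldl_set_length, ih]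
    by_cases hj : j < s.length
    · by_cases hn : n = j
      · subst hn; simp [hj]
      · simp only [hn, if_false]
        rcases Nat.lt_or_ge j n with h | h
        · simp [h, hj, Nat.lt_succ_of_lt h]
        · have h1 : ¬ j < n := Nat.not_lt.mpr h
          have h2 : ¬ j < n + 1 := by omega
          simp [h1, h2]
    · simp [hj]
      omega

-- the overwrite loop starting from any list of length n yields the row table
theorem pv_foldl_set_eq_map {α : Type} (f : Nat → α) (s : List α) (n : Nat)
    (hs : s.length = n) :
    (List.range n).foldl (fun s i => s.set i (f i)) s = (List.range n).map f := by
  apply List.ext_getElem?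
  intro j
  rw [pv_foldl_set_getElem?, hs]
  by_cases hj : j < n
  · simp [hj]
  · have h1 : s[j]? = none := List.getElem?_eq_none (by omega)
    simp [hj, h1]

-- B's inner j-loop: sets every position j < length of acc with v-row bit 1 to 1
theorem pv_inner_length (q : Nat → Prop) [DecidablePred q] :
    ∀ (l : List Nat) (acc : List Int),
      (l.foldl (fun acc j => if q j then acc.set j 1 else acc) acc).length = acc.length := by
  intro l
  induction l with
  | nil => intro acc; rfl
  | cons x l ih => intro acc; by_cases hx : q x <;> simp [hx, ih]

theorem pv_inner_getElem? (q : Nat → Prop) [DecidablePred q] :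
    ∀ (l : List Nat) (acc : List Int) (j : Nat),
      (l.foldl (fun acc j => if q j then acc.set j 1 else acc) acc)[j]?
        = if j ∈ l ∧ q j ∧ j < acc.length then some 1 else acc[j]? := by
  intro l
  induction l with
  | nil => intro acc j; simp
  | cons x l ih =>
    intro acc j
    simp only [List.foldl_cons]
    by_cases hx : q x
    · rw [if_pos hx, ih, List.length_set, List.getElem?_set]
      by_cases hm : j ∈ l ∧ q j ∧ j < acc.length
      · simp only [hm, List.mem_cons]
        simp
      · simp only [hm, if_false]
        by_cases hex : x = j
        · subst hex
          by_cases hlen : x < acc.length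
          · simp [hx, hlen]
          · simp [hx, hlen]
        · simp only [hex, if_false]
          have : (j ∈ x :: l ∧ q j ∧ j < acc.length) ↔ (j ∈ l ∧ q j ∧ j < acc.length) := by
            constructor
            · rintro ⟨hj, h2, h3⟩
              rcases List.mem_cons.mp hj with h | h
              · exact absurd h.symm hex
              · exact ⟨h, h2, h3⟩
            · rintro ⟨hj, h2, h3⟩; exact ⟨List.mem_cons_of_mem _ hj, h2, h3⟩
          rw [if_neg (fun h => hm (this.mp h))]
    · rw [if_neg hx, ih]
      have h1 : ¬ (j ∈ x :: l ∧ q j ∧ j < acc.length) ↔ ¬ (j ∈ l ∧ q j ∧ j < acc.length) := by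
        constructor
        · intro h hc; exact h ⟨List.mem_cons_of_mem _ hc.1, hc.2⟩
        · intro h hc
          rcases List.mem_cons.mp hc.1 with he | he
          · subst he; exact hx hc.2.1
          · exact h ⟨he, hc.2⟩
      by_cases hm : j ∈ l ∧ q j ∧ j < acc.length
      · have : j ∈ x :: l ∧ q j ∧ j < acc.length := ⟨List.mem_cons_of_mem _ hm.1, hm.2⟩
        simp [hm, this]
      · rw [if_neg hm, if_neg (fun h => (h1.mpr hm) h)]
-- B's outer k-loop over a generic index list
theorem pv_outer_getElem? (p : Nat → Prop) [DecidablePred p] (q : Nat → Nat → Prop)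
    [∀ k, DecidablePred (q k)] (m : Nat) :
    ∀ (l : List Nat) (acc : List Int) (j : Nat),
      (l.foldl (fun acc k =>
          if p k then (List.range m).foldl (fun acc j => if q k j then acc.set j 1 else acc) acc
          else acc) acc)[j]?
        = if l.any (fun k => decide (p k) && decide (q k j)) ∧ j < m ∧ j < acc.length
          then some 1 else acc[j]? := by
  intro l
  induction l with
  | nil => intro acc j; simp
  | cons x l ih =>
    intro acc j
    simp only [List.foldl_cons, List.any_cons]
    by_cases hx : p x
    · rw [if_pos hx, ih, pv_inner_length, pv_inner_getElem?]
      simp only [List.mem_range, hx, decide_true, Bool.true_and]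
      by_cases hrest : l.any (fun k => decide (p k) && decide (q k j)) ∧ j < m ∧ j < acc.length
      · simp [hrest]
      · rw [if_neg hrest]
        by_cases hq : q x j
        · by_cases hjm : j < m ∧ j < acc.length
          · have : (decide (q x j) || l.any fun k => decide (p k) && decide (q k j)) = true ∧
                j < m ∧ j < acc.length := by simp [hq, hjm.1, hjm.2]
            simp [hq, hjm.1, hjm.2]
          · have h2 : ¬ (j < m ∧ q x j ∧ j < acc.length) := by tauto
            rw [if_neg h2]
            have h3 : ¬ ((decide (q x j) || l.any fun k => decide (p k) && decide (q k j)) = true ∧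
                j < m ∧ j < acc.length) := by tauto
            rw [if_neg h3]
        · have h2 : ¬ (j < m ∧ q x j ∧ j < acc.length) := by tauto
          rw [if_neg h2]
          have h3 : ((decide (q x j) || l.any fun k => decide (p k) && decide (q k j)) = true ∧
              j < m ∧ j < acc.length) ↔
              ((l.any fun k => decide (p k) && decide (q k j)) = true ∧ j < m ∧ j < acc.length) := by
            simp [hq]
          rw [if_neg (fun h => hrest (h3.mp h))]
    · rw [if_neg hx, ih]
      simp only [decide_eq_false hx, Bool.false_and, Bool.false_or]

-- A's whole result, closed form
theorem pv_A_closed (u v : List (List Int)) :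
    booleanProd u v
      = (List.range u.length).map (fun i =>
          (List.range v.length).map (pvCell v u.length (u.getD i []))) := by
  unfold booleanProd
  simp only [PySem.List.len_eq, PySem.List.pyRange_zero_nat, List.foldl_map,
    PySem.List.pyGetD_natCast, PySem.List.pySetD_natCast]
  have hrow : ∀ i : Nat,
      (List.range v.length).foldl (fun si j =>
        let isEqual := (List.range u.length).foldl (fun isEqual k =>
            if (u.getD i []).getD k 0 = 1 then
              (if (v.getD k []).getD j 0 = 1 then true else isEqual)
            else isEqual) false
        if isEqual then si ++ [(1 : Int)] else si ++ [(0 : Int)]) []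
      = (List.range v.length).map (pvCell v u.length (u.getD i [])) := by
    intro i
    have hstep : ∀ (si : List Int) (j : Nat),
        (let isEqual := (List.range u.length).foldl (fun isEqual k =>
            if (u.getD i []).getD k 0 = 1 then
              (if (v.getD k []).getD j 0 = 1 then true else isEqual)
            else isEqual) false
         if isEqual then si ++ [(1 : Int)] else si ++ [(0 : Int)])
        = si ++ [pvCell v u.length (u.getD i []) j] := by
      intro si j
      simp only
      rw [pv_flag_foldl (fun k => (u.getD i []).getD k 0 = 1)
            (fun k => (v.getD k []).getD j 0 = 1) (List.range u.length) false]
      simp only [Bool.false_or, pvCell]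
      split <;> rfl
    calc (List.range v.length).foldl (fun si j =>
            let isEqual := (List.range u.length).foldl (fun isEqual k =>
                if (u.getD i []).getD k 0 = 1 then
                  (if (v.getD k []).getD j 0 = 1 then true else isEqual)
                else isEqual) false
            if isEqual then si ++ [(1 : Int)] else si ++ [(0 : Int)]) []
        = (List.range v.length).foldl (fun si j =>
            si ++ [pvCell v u.length (u.getD i []) j]) [] := by
          exact List.foldl_ext _ _ _ (fun si j _ => hstep si j)
      _ = (List.range v.length).map (pvCell v u.length (u.getD i [])) := by
          rw [PySem.List.foldl_append_singleton_eq_map]; rfl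
  have hs0 : ((List.range u.length).foldl (fun s (_i : Nat) =>
      s ++ [(List.range v.length).foldl (fun col (_j : Nat) => col ++ [(0 : Int)]) []])
      ([] : List (List Int))).length = u.length := by
    rw [PySem.List.foldl_append_singleton_eq_map]
    simp
  calc _ = (List.range u.length).foldl (fun s i =>
            s.set i ((List.range v.length).map (pvCell v u.length (u.getD i []))))
            ((List.range u.length).foldl (fun s (_i : Nat) =>
              s ++ [(List.range v.length).foldl (fun col (_j : Nat) => col ++ [(0 : Int)]) []])
              ([] : List (List Int))) := by
        exact List.foldl_ext _ _ _ (fun s i _ => by rw [hrow i])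
    _ = _ := pv_foldl_set_eq_map _ _ _ hs0

-- B's row for a given source row, closed form
theorem pv_B_row (u v : List (List Int)) (row : List Int) :
    ((List.range u.length).foldl (fun acc k =>
        if row.getD k 0 = 1 then
          (List.range v.length).foldl (fun acc j =>
            if (v.getD k []).getD j 0 = 1 then acc.set j 1 else acc) acc
        else acc) (List.replicate v.length (0 : Int)))
      = (List.range v.length).map (pvCell v u.length row) := by
  apply List.ext_getElem?
  intro j
  rw [pv_outer_getElem? (fun k => row.getD k 0 = 1)
        (fun k j => (v.getD k []).getD j 0 = 1) v.length (List.range u.length)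
        (List.replicate v.length 0) j]
  simp only [List.length_replicate]
  by_cases hj : j < v.length
  · rw [List.getElem?_map, List.getElem?_range hj]
    simp only [Option.map_some]
    unfold pvCell
    by_cases ha : ((List.range u.length).any
        (fun k => decide (row.getD k 0 = 1) && decide ((v.getD k []).getD j 0 = 1))) = true
    · rw [if_pos ⟨ha, hj, hj⟩, if_pos ha]
    · rw [if_neg (by tauto), if_neg ha, List.getElem?_replicate, if_pos hj]
  · rw [if_neg (by tauto), List.getElem?_replicate, if_neg hj, List.getElem?_map,
      List.getElem?_eq_none (by simpa using Nat.le_of_not_lt hj)]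
    simp only [Option.map_none]

-- B's whole result, closed form
theorem pv_B_closed (u v : List (List Int)) :
    booleanProd_alt u v
      = u.map (fun row => (List.range v.length).map (pvCell v u.length row)) := by
  unfold booleanProd_alt
  simp only [PySem.List.len_eq, PySem.List.pyRange_zero_nat, List.foldl_map,
    PySem.List.pyGetD_natCast, PySem.List.pySetD_natCast]
  by_cases hv : (v.length : Int) = 0
  · have hv0 : v.length = 0 := by exact_mod_cast hv
    rw [if_pos hv, hv0]
    simp
  · rw [if_neg hv]
    calc u.foldl (fun out row =>
            out ++ [(List.range u.length).foldl (fun acc k =>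
              if row.getD k 0 = 1 then
                (List.range v.length).foldl (fun acc j =>
                  if (v.getD k []).getD j 0 = 1 then acc.set j 1 else acc) acc
              else acc) (List.replicate v.length (0 : Int))]) []
        = u.foldl (fun out row =>
            out ++ [(List.range v.length).map (pvCell v u.length row)]) [] := by
          exact List.foldl_ext _ _ _ (fun out row _ => by rw [pv_B_row u v row])
      _ = _ := by rw [PySem.List.foldl_append_singleton_eq_map]; rfl

-- indexing a map over range by getD equals mapping the list itself
theorem pv_map_range_getD {α β : Type} (f : α → β) (d : α) (xs : List α) :
    (List.range xs.length).map (fun i => f (xs.getD i d)) = xs.map f := by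
  apply List.ext_getElem
  · simp
  · intro i h1 h2
    simp [List.getD_eq_getElem?_getD, List.getElem?_eq_getElem (by simpa using h1 : i < xs.length)]

-- ===== VERDICT (by name: the statement is the Claim_ definition above) =====
theorem booleanProd_spec : Claim_equal_booleanProd := by
  intro u v _hdom _hpre
  unfold Spec_booleanProd
  rw [pv_A_closed, pv_B_closed]
  exact pv_map_range_getD (fun row => (List.range v.length).map (pvCell v u.length row)) [] u
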